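-- pv_equiv track=rewrite | github.com/alecont1/vaudit2.0 | src/domain/validators/test_method.py | _find_method_key
-- ===== SOURCE A (Python) =====
-- VALID_TEST_METHODS: dict[str, dict] = {
--     "fall-of-potential": {
--         "aliases": ["fall of potential", "3-point", "three-point"],
--         "new_ok": True,
--         "existing_ok": True,
--     },
--     "slope": {
--         "aliases": [],
--         "new_ok": True,
--         "existing_ok": True,
--     },
--     "clamp-on": {
--         "aliases": ["clamp on", "clamp"],
--         "new_ok": False,
--         "existing_ok": True,
--     },
--     "attached-rod": {
--         "aliases": ["attached rod"],
--         "new_ok": True,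
--         "existing_ok": True,
--     },
--     "star-delta": {
--         "aliases": ["star delta"],
--         "new_ok": True,
--         "existing_ok": True,
--     },
-- }
--
-- def _normalize_method(method: str) -> str:
--     """Normalize method string for matching.
--
--     Converts to lowercase, strips whitespace, replaces spaces with hyphens.
--
--     Args:
--         method: Raw method string from extraction.
--
--     Returns:
--         Normalized method string.
--     """
--     return method.lower().strip().replace(" ", "-")
--
-- def _find_method_key(normalized_method: str) -> str | None:
--     """Find the canonical method key for a normalized method string.
--
--     Checks both primary keys and aliases.
--
--     Args:
--         normalized_method: Normalized method string.
--
--     Returns: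
--         Canonical method key if found, None otherwise.
--     """
--     # Check if it matches a primary key
--     if normalized_method in VALID_TEST_METHODS:
--         return normalized_method
--
--     # Check aliases
--     for method_key, info in VALID_TEST_METHODS.items():
--         # Normalize aliases for comparison
--         normalized_aliases = [_normalize_method(alias) for alias in info["aliases"]]
--         if normalized_method in normalized_aliases:
--             return method_key
--
--     return None
-- ===== SOURCE B (Python) =====
-- # B: one module-level flat literal table mapping each canonical key and each
-- # normalized alias directly to its canonical key; the function is a single dict lookup.
-- _LOOKUP: dict[str, str] = {
--     "fall-of-potential": "fall-of-potential",
--     "3-point": "fall-of-potential",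
--     "three-point": "fall-of-potential",
--     "slope": "slope",
--     "clamp-on": "clamp-on",
--     "clamp": "clamp-on",
--     "attached-rod": "attached-rod",
--     "star-delta": "star-delta",
-- }
--
-- def _find_method_key(normalized_method: str) -> str | None:
--     return _LOOKUP.get(normalized_method)
-- ===== Notes on version B (the rewrite author's own statement) =====
-- stated objective: simpler
-- what changed: Replaces the primary-key check plus per-call alias-normalizing scan with one flat literal dict mapping every canonical key and every normalized alias to its canonical key, so the function body is a single dict lookup.
import Mathlib
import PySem

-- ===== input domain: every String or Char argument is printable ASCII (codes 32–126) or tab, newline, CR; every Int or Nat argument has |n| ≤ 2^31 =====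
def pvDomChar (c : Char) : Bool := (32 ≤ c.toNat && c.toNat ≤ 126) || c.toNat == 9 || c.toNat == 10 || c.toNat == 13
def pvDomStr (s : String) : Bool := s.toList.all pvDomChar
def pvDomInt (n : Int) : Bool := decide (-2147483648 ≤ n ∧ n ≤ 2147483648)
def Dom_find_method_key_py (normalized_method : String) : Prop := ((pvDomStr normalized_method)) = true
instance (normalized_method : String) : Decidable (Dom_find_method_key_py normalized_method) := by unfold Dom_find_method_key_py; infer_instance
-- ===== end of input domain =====

-- B replaces A's per-call primary-key check plus alias-normalizing scan with one flat
-- literal key/alias → canonical-key table and a single lookup (objective: simpler).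

-- ===== PORT A =====
def pyNormalizeMethod (method : String) : String :=
  PySem.Str.replace (PySem.Str.strip (PySem.Str.lower method)) " " "-"

def validTestMethods : PySem.Dict String (List String × Bool × Bool) :=
  PySem.Dict.ofList
    [ ("fall-of-potential", (["fall of potential", "3-point", "three-point"], true, true))
    , ("slope", (([] : List String), true, true))
    , ("clamp-on", (["clamp on", "clamp"], false, true))
    , ("attached-rod", (["attached rod"], true, true))
    , ("star-delta", (["star delta"], true, true)) ]

-- the 'for method_key, info in VALID_TEST_METHODS.items()' alias loop
def findMethodAliasLoop (s : String) : List (String × (List String × Bool × Bool)) → Option String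
  | [] => none
  | (method_key, info) :: rest =>
    let normalized_aliases := info.1.map pyNormalizeMethod
    if normalized_aliases.contains s then some method_key
    else findMethodAliasLoop s rest

def find_method_key_py (normalized_method : String) : Option String :=
  if validTestMethods.contains normalized_method then some normalized_method
  else findMethodAliasLoop normalized_method validTestMethods.items

-- ===== PORT B =====
-- Source B's module-level flat literal dict _LOOKUP
def lookupTable : PySem.Dict String String :=
  PySem.Dict.ofList
    [ ("fall-of-potential", "fall-of-potential")
    , ("3-point", "fall-of-potential")
    , ("three-point", "fall-of-potential")
    , ("slope", "slope")
    , ("clamp-on", "clamp-on")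
    , ("clamp", "clamp-on")
    , ("attached-rod", "attached-rod")
    , ("star-delta", "star-delta") ]

def find_method_key_py_alt (normalized_method : String) : Option String :=
  lookupTable.get? normalized_method

-- ===== PRECONDITION & SPEC =====
def Spec_find_method_key_py (normalized_method : String) (out : Option String) : Prop := out = find_method_key_py_alt normalized_method
instance (normalized_method : String) (out : Option String) : Decidable (Spec_find_method_key_py normalized_method out) := by unfold Spec_find_method_key_py; infer_instance

-- ===== CLAIM =====
def Claim_equal_find_method_key_py : Prop := ∀ (normalized_method : String), Dom_find_method_key_py normalized_method → Spec_find_method_key_py normalized_method (find_method_key_py normalized_method)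

-- ===== LEMMAS AND PROOFS =====

-- A's dict literal, evaluated to its item list
theorem validTestMethods_items :
    validTestMethods.items
      = [ ("fall-of-potential", (["fall of potential", "3-point", "three-point"], true, true))
        , ("slope", (([] : List String), true, true))
        , ("clamp-on", (["clamp on", "clamp"], false, true))
        , ("attached-rod", (["attached rod"], true, true))
        , ("star-delta", (["star delta"], true, true)) ] := by decide

-- the normalized alias lists of A, evaluated
theorem norm_aliases_eval :
    (["fall of potential", "3-point", "three-point"].map pyNormalizeMethod
      = ["fall-of-potential", "3-point", "three-point"])
    ∧ (["clamp on", "clamp"].map pyNormalizeMethod = ["clamp-on", "clamp"])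
    ∧ (["attached rod"].map pyNormalizeMethod = ["attached-rod"])
    ∧ (["star delta"].map pyNormalizeMethod = ["star-delta"]) := by decide

-- B's literal dict, evaluated past ofList's duplicate-overwrite pass
theorem lookupTable_eval :
    lookupTable = PySem.Dict.mk
      [ ("fall-of-potential", "fall-of-potential")
      , ("3-point", "fall-of-potential")
      , ("three-point", "fall-of-potential")
      , ("slope", "slope")
      , ("clamp-on", "clamp-on")
      , ("clamp", "clamp-on")
      , ("attached-rod", "attached-rod")
      , ("star-delta", "star-delta") ] := by decide

-- ===== VERDICT =====
theorem find_method_key_py_spec : Claim_equal_find_method_key_py := by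
  intro s _
  unfold Spec_find_method_key_py
  by_cases h1 : s = "fall-of-potential"; · subst h1; decide
  by_cases h2 : s = "slope"; · subst h2; decide
  by_cases h3 : s = "clamp-on"; · subst h3; decide
  by_cases h4 : s = "attached-rod"; · subst h4; decide
  by_cases h5 : s = "star-delta"; · subst h5; decide
  by_cases h6 : s = "3-point"; · subst h6; decide
  by_cases h7 : s = "three-point"; · subst h7; decide
  by_cases h8 : s = "clamp"; · subst h8; decide
  simp [find_method_key_py, find_method_key_py_alt, lookupTable_eval, PySem.Dict.contains,
    validTestMethods_items, findMethodAliasLoop, norm_aliases_eval.1, norm_aliases_eval.2.1,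
    norm_aliases_eval.2.2.1, norm_aliases_eval.2.2.2, PySem.Dict.get?,
    List.find?, h1, h3, h4, h5, h6, h7, h8,
    Ne.symm h1, Ne.symm h3, Ne.symm h5,
    beq_eq_false_iff_ne.mpr (Ne.symm h1), beq_eq_false_iff_ne.mpr (Ne.symm h2),
    beq_eq_false_iff_ne.mpr (Ne.symm h3), beq_eq_false_iff_ne.mpr (Ne.symm h4),
    beq_eq_false_iff_ne.mpr (Ne.symm h5), beq_eq_false_iff_ne.mpr (Ne.symm h6),
    beq_eq_false_iff_ne.mpr (Ne.symm h7), beq_eq_false_iff_ne.mpr (Ne.symm h8)]
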